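-- pv_equiv track=rewrite | github.com/sang-gyeong/Coding_Test | Test/20라상_TEST/test2.py | solution
-- ===== SOURCE A (Python) =====
-- from itertools import combinations
--
-- def solution(answer_sheet, sheets):
--     answer = 0
--     n = len(sheets)
--     m = len(answer_sheet)
--     cases = combinations(range(n), 2)
--     for case in cases:
--         (s1, s2) = case
--         total = 0
--         max_len = 0
--         flag = -1
--         for i in range(m):
--             if sheets[s1][i] == sheets[s2][i] and sheets[s2][i] != answer_sheet[i]:
--                 total += 1
--                 flag = 1 if flag == -1 else flag + 1
--             else:
--                 max_len = flag if flag > max_len else max_len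
--                 flag = -1
--         max_len = flag if flag > max_len else max_len
--         score = total + max_len**2
--         answer = score if score > answer else answer
--
--     return answer
-- ===== SOURCE B (Python) =====
-- def solution(answer_sheet, sheets):
--     best = 0
--     n = len(sheets)
--     for i in range(n):
--         for j in range(i + 1, n):
--             marked = {k for k, (x, y, z)
--                       in enumerate(zip(sheets[i], sheets[j], answer_sheet))
--                       if x == y and y != z}
--             run = 0
--             for p in marked:
--                 if p - 1 not in marked:
--                     q = p + 1
--                     while q in marked:
--                         q += 1
--                     run = max(run, q - p)
--             best = max(best, len(marked) + run * run)
--     return best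
-- ===== Notes on version B (the rewrite author's own statement) =====
-- stated objective: alternative
-- what changed: Replaces A's per-index flag/max_len run-length state machine with the hash-set longest-consecutive-sequence algorithm: build the set of equal-but-wrong positions, score = set size + squared longest consecutive block, found by walking forward only from block starts (positions whose predecessor is not in the set); pairs come from nested index loops instead of itertools.combinations.
import Mathlib
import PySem

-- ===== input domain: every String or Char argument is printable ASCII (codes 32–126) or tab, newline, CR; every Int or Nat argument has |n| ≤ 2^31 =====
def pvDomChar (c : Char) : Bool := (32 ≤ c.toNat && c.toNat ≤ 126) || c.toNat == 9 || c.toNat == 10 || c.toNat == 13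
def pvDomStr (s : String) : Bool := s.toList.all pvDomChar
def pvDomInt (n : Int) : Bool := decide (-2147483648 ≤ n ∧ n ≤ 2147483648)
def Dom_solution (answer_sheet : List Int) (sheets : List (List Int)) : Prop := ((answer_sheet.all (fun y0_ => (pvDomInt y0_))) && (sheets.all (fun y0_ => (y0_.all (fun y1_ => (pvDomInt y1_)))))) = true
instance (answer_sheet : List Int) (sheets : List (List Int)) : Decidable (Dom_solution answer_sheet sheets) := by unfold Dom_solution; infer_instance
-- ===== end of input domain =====

-- B replaces A's inline flag/max_len run-length state machine by the hash-set
-- longest-consecutive-block algorithm over the set of equal-but-wrong positions,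
-- with nested index loops instead of itertools.combinations (objective: alternative).


-- ===== PORT A =====
def solution (answer_sheet : List Int) (sheets : List (List Int)) : Int :=
  let n : Int := sheets.length
  let m : Int := answer_sheet.length
  let cases := PySem.List.combinations (PySem.List.pyRange 0 n 1) 2
  cases.foldl (fun answer c =>
      -- (s1, s2) = case
      let s1 := PySem.List.pyGetD c 0 0
      let s2 := PySem.List.pyGetD c 1 0
      let st :=
        (PySem.List.pyRange 0 m 1).foldl (fun (st : Int × Int × Int) i =>
          -- st is (total, max_len, flag)
          if (PySem.List.pyGetD (PySem.List.pyGetD sheets s1 []) i 0 ==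
                PySem.List.pyGetD (PySem.List.pyGetD sheets s2 []) i 0) &&
             (PySem.List.pyGetD (PySem.List.pyGetD sheets s2 []) i 0 !=
                PySem.List.pyGetD answer_sheet i 0) then
            (st.1 + 1, st.2.1, if st.2.2 == -1 then 1 else st.2.2 + 1)
          else
            (st.1, if st.2.2 > st.2.1 then st.2.2 else st.2.1, -1)) (0, 0, -1)
      let max_len := if st.2.2 > st.2.1 then st.2.2 else st.2.1
      let score := st.1 + max_len ^ 2
      if score > answer then score else answer) 0

-- ===== PORT B =====
-- the set comprehension {k for k,(x,y,z) in enumerate(zip(a,b,ans)) if x == y and y != z}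
def pvMarked : Int → List Int → List Int → List Int → List Int
  | k, x :: xs, y :: ys, z :: zs =>
    if x == y && y != z then k :: pvMarked (k + 1) xs ys zs else pvMarked (k + 1) xs ys zs
  | _, _, _, _ => []

-- the 'while q in marked: q += 1' loop; fuel bounds the iterations (each consumes a
-- distinct member of the set, so |marked| iterations suffice)
def pvWalk (s : PySem.Set Int) : Nat → Int → Int
  | 0, q => q
  | fuel + 1, q => if PySem.Set.contains s q then pvWalk s fuel (q + 1) else q

def solution_alt (answer_sheet : List Int) (sheets : List (List Int)) : Int :=
  let n : Int := sheets.length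
  (PySem.List.pyRange 0 n 1).foldl (fun best i =>
    (PySem.List.pyRange (i + 1) n 1).foldl (fun best j =>
      let marked : PySem.Set Int :=
        PySem.Set.ofList (pvMarked 0 (PySem.List.pyGetD sheets i [])
          (PySem.List.pyGetD sheets j []) answer_sheet)
      let run := marked.foldl (fun run p =>
        if PySem.Set.contains marked (p - 1) then run
        else max run (pvWalk marked marked.length (p + 1) - p)) 0
      max best (PySem.Set.len marked + run * run)) best) 0

-- ===== PRECONDITION & SPEC =====
-- Pre_ excludes exactly the inputs where A raises IndexError: some sheet shorter than
-- answer_sheet while at least two sheets exist (A indexes every sheet up to len(answer_sheet)).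
def Pre_solution (answer_sheet : List Int) (sheets : List (List Int)) : Prop :=
  sheets.length < 2 ∨ ∀ s ∈ sheets, answer_sheet.length ≤ s.length
instance (answer_sheet : List Int) (sheets : List (List Int)) : Decidable (Pre_solution answer_sheet sheets) := by unfold Pre_solution; infer_instance

def pvWitness_solution : List Int × List (List Int) :=
  ([1, 2, 3], [[1, 1, 1], [1, 1, 2], [2, 2, 2]])

def Spec_solution (answer_sheet : List Int) (sheets : List (List Int)) (out : Int) : Prop := out = solution_alt answer_sheet sheets
instance (answer_sheet : List Int) (sheets : List (List Int)) (out : Int) : Decidable (Spec_solution answer_sheet sheets out) := by unfold Spec_solution; infer_instance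

-- ===== CLAIM (what is proved, stated in full; the proofs are below) =====
def Claim_equal_solution : Prop := ∀ (answer_sheet : List Int) (sheets : List (List Int)), Dom_solution answer_sheet sheets → Pre_solution answer_sheet sheets → Spec_solution answer_sheet sheets (solution answer_sheet sheets)

-- ===== LEMMAS AND PROOFS =====

-- per-position match pattern of a pair of sheets against the answer sheet
def pvZip3Match : List Int → List Int → List Int → List Bool
  | x :: xs, y :: ys, z :: zs => ((x == y) && (y != z)) :: pvZip3Match xs ys zs
  | _, _, _ => []

-- indices (from k) of the true entries of a boolean list
def trueIdx : Int → List Bool → List Int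
  | k, true :: l => k :: trueIdx (k + 1) l
  | k, false :: l => trueIdx (k + 1) l
  | _, [] => []

-- lengths of the maximal true-runs (with harmless zero entries at false positions)
def runsAux : Nat → List Bool → List Nat
  | c, [] => [c]
  | c, true :: l => runsAux (c + 1) l
  | c, false :: l => c :: runsAux 0 l

-- length of the leading true-run
def pvStreak : List Bool → Nat
  | true :: l => 1 + pvStreak l
  | _ => 0

-- A's inner-loop step, with the match condition already evaluated to a Bool
def stepA (st : Int × Int × Int) (b : Bool) : Int × Int × Int :=
  if b then (st.1 + 1, st.2.1, if st.2.2 == -1 then 1 else st.2.2 + 1)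
  else (st.1, if st.2.2 > st.2.1 then st.2.2 else st.2.1, -1)

-- longest run of `true` given current-run length `cur` and best-so-far `best`
def maxRunAux (cur best : Int) : List Bool → Int
  | [] => max cur best
  | true :: l => maxRunAux (cur + 1) best l
  | false :: l => maxRunAux 0 (max cur best) l

-- B's per-element step on the set of marked indices
def stepB (s : List Int) (r p : Int) : Int :=
  if PySem.Set.contains s (p - 1) then r
  else max r (pvWalk s s.length (p + 1) - p)

-- fold over all index pairs (x, y), x before y, in lexicographic order
def tailsFold (G : Int → Int → Int → Int) : List Int → Int → Int
  | [], r => r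
  | x :: t, r => tailsFold G t (t.foldl (fun acc y => G acc x y) r)

lemma stepA_true (st : Int × Int × Int) :
    stepA st true = (st.1 + 1, st.2.1, if st.2.2 = -1 then 1 else st.2.2 + 1) := by
  simp [stepA]

lemma stepA_false (st : Int × Int × Int) :
    stepA st false = (st.1, if st.2.2 > st.2.1 then st.2.2 else st.2.1, -1) := rfl

lemma foldl_range'_eq {α β : Type} (G : α → Nat → α) (F : α → β → α) :
    ∀ (bl : List β) (s : Nat) (init : α),
      (∀ (k : Nat) (hk : k < bl.length) (acc : α), G acc (s + k) = F acc bl[k]) →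
      (List.range' s bl.length).foldl G init = bl.foldl F init := by
  intro bl
  induction bl with
  | nil => intro s init _; simp
  | cons x tl ih =>
    intro s init h
    rw [List.length_cons, List.range'_succ, List.foldl_cons, List.foldl_cons]
    have h0 := h 0 (by simp) init
    simp only [Nat.add_zero, List.getElem_cons_zero] at h0
    rw [h0]
    exact ih (s + 1) _ (fun k hk acc => by
      have := h (k + 1) (by simpa using Nat.succ_lt_succ hk) acc
      simpa [Nat.add_assoc, Nat.add_comm 1 k] using this)

lemma stepA_fold :
    ∀ (bl : List Bool) (t ml f : Int), 0 ≤ ml → (f = -1 ∨ 1 ≤ f) →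
      (bl.foldl stepA (t, ml, f)).1 = t + (bl.count true : Int) ∧
      (if (bl.foldl stepA (t, ml, f)).2.2 > (bl.foldl stepA (t, ml, f)).2.1
        then (bl.foldl stepA (t, ml, f)).2.2 else (bl.foldl stepA (t, ml, f)).2.1)
        = maxRunAux (if f = -1 then 0 else f) ml bl := by
  intro bl
  induction bl with
  | nil =>
    intro t ml f hml hf
    refine ⟨by simp, ?_⟩
    rcases hf with hf | hf
    · subst hf; simp [maxRunAux]; omega
    · rw [if_neg (by omega : ¬ f = -1)]; simp [maxRunAux]; omega
  | cons b tl ih =>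
    intro t ml f hml hf
    cases b with
    | true =>
      rw [List.foldl_cons, stepA_true]
      by_cases hf1 : f = -1
      · rw [if_pos (by simpa using hf1)]
        obtain ⟨ih1, ih2⟩ := ih (t + 1) ml 1 hml (Or.inr le_rfl)
        refine ⟨by rw [ih1]; simp; ring, ?_⟩
        rw [ih2, if_pos hf1]
        simp [maxRunAux]
      · rw [if_neg (by simpa using hf1)]
        have hf2 : 1 ≤ f := hf.resolve_left hf1
        obtain ⟨ih1, ih2⟩ := ih (t + 1) ml (f + 1) hml (Or.inr (by omega))
        refine ⟨by rw [ih1]; simp; ring, ?_⟩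
        rw [ih2, if_neg hf1, if_neg (by omega : ¬ f + 1 = -1)]
        simp [maxRunAux]
    | false =>
      rw [List.foldl_cons, stepA_false]
      obtain ⟨ih1, ih2⟩ := ih t (if f > ml then f else ml) (-1) (by split <;> omega) (Or.inl rfl)
      refine ⟨by rw [ih1]; simp, ?_⟩
      rw [ih2, if_pos rfl]
      have h3 : (if f > ml then f else ml) = max (if f = -1 then 0 else f) ml := by
        rcases hf with h | h
        · subst h; rw [if_neg (by omega : ¬ (-1 : Int) > ml), if_pos rfl, max_eq_right hml]
        · rw [if_neg (by omega : ¬ f = -1)]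
          by_cases hfm : f > ml
          · rw [if_pos hfm, max_eq_left (by omega)]
          · rw [if_neg hfm, max_eq_right (by omega)]
      rw [h3]
      simp [maxRunAux]

lemma pvZip3Match_length :
    ∀ (a b c : List Int), (pvZip3Match a b c).length = min a.length (min b.length c.length) := by
  intro a
  induction a with
  | nil => intro b c; simp [pvZip3Match]
  | cons x xs ih =>
    intro b c
    cases b with
    | nil => simp [pvZip3Match]
    | cons y ys =>
      cases c with
      | nil => simp [pvZip3Match]
      | cons z zs => simp [pvZip3Match, ih ys zs]

lemma pvZip3Match_getD :
    ∀ (k : Nat) (a b c : List Int), k < a.length → k < b.length → k < c.length →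
      (pvZip3Match a b c).getD k false
        = ((a.getD k 0 == b.getD k 0) && (b.getD k 0 != c.getD k 0)) := by
  intro k
  induction k with
  | zero =>
    intro a b c ha hb hc
    match a, b, c with
    | x :: _, y :: _, z :: _ => simp [pvZip3Match]
  | succ k ih =>
    intro a b c ha hb hc
    match a, b, c with
    | x :: xs, y :: ys, z :: zs =>
      simpa [pvZip3Match] using
        ih xs ys zs (by simpa using ha) (by simpa using hb) (by simpa using hc)

lemma int_if_gt_eq_max (score answer : Int) :
    (if score > answer then score else answer) = max answer score := by
  by_cases h : score > answer
  · rw [if_pos h, max_eq_right (by omega)]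
  · rw [if_neg h, max_eq_left (by omega)]

-- pvMarked is the index list of the true entries of the match pattern
lemma pvMarked_eq_trueIdx :
    ∀ (a b c : List Int) (k : Int),
      pvMarked k a b c = trueIdx k (pvZip3Match a b c) := by
  intro a
  induction a with
  | nil => intro b c k; cases b <;> cases c <;> simp [pvMarked, pvZip3Match, trueIdx]
  | cons x xs ih =>
    intro b c k
    cases b with
    | nil => simp [pvMarked, pvZip3Match, trueIdx]
    | cons y ys =>
      cases c with
      | nil => simp [pvMarked, pvZip3Match, trueIdx]
      | cons z zs =>
        simp only [pvMarked, pvZip3Match]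
        by_cases h : (x == y && y != z) = true
        · simp [h, trueIdx, ih ys zs]
        · rw [if_neg h, eq_false_of_ne_true h]
          simp [trueIdx, ih ys zs]

lemma trueIdx_mem :
    ∀ (l : List Bool) (k q : Int),
      q ∈ trueIdx k l ↔ ∃ t : Nat, t < l.length ∧ l.getD t false = true ∧ q = k + t := by
  intro l
  induction l with
  | nil => intro k q; simp [trueIdx]
  | cons b tl ih =>
    intro k q
    cases b with
    | true =>
      simp only [trueIdx, List.mem_cons, ih (k + 1) q]
      constructor
      · rintro (rfl | ⟨t, ht, hg, rfl⟩)
        · exact ⟨0, by simp, by simp, by simp⟩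
        · exact ⟨t + 1, by simp; omega, by simpa using hg, by push_cast; ring⟩
      · rintro ⟨t, ht, hg, rfl⟩
        cases t with
        | zero => left; simp
        | succ s =>
          right; exact ⟨s, by simpa using ht, by simpa using hg, by push_cast; ring⟩
    | false =>
      simp only [trueIdx, ih (k + 1) q]
      constructor
      · rintro ⟨t, ht, hg, rfl⟩
        exact ⟨t + 1, by simp; omega, by simpa using hg, by push_cast; ring⟩
      · rintro ⟨t, ht, hg, rfl⟩
        cases t with
        | zero => simp at hg
        | succ s => exact ⟨s, by simpa using ht, by simpa using hg, by push_cast; ring⟩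

lemma trueIdx_lower {l : List Bool} {k q : Int} (h : q ∈ trueIdx k l) : k ≤ q := by
  rcases (trueIdx_mem l k q).1 h with ⟨t, -, -, rfl⟩
  omega

lemma trueIdx_nodup (l : List Bool) (k : Int) : (trueIdx k l).Nodup := by
  induction l generalizing k with
  | nil => simp [trueIdx]
  | cons b tl ih =>
    cases b with
    | true =>
      rw [show trueIdx k (true :: tl) = k :: trueIdx (k + 1) tl from rfl, List.nodup_cons]
      exact ⟨fun h => absurd (trueIdx_lower h) (by omega), ih (k + 1)⟩
    | false => exact ih (k + 1)

lemma trueIdx_length (l : List Bool) (k : Int) :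
    (trueIdx k l).length = l.count true := by
  induction l generalizing k with
  | nil => simp [trueIdx]
  | cons b tl ih =>
    cases b with
    | true => simp [trueIdx, ih (k + 1), List.count_cons]
    | false => simp [trueIdx, ih (k + 1), List.count_cons]

lemma foldl_add_nodup :
    ∀ (xs s : List Int), xs.Nodup → (∀ x ∈ xs, x ∉ s) →
      xs.foldl PySem.Set.add s = s ++ xs := by
  intro xs
  induction xs with
  | nil => intro s _ _; simp
  | cons x tl ih =>
    intro s hnd hdis
    rw [List.foldl_cons, PySem.Set.add_of_not_mem (hdis x (by simp))]
    rw [ih (s ++ [x]) (List.nodup_cons.1 hnd).2 ?_]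
    · simp
    · intro y hy hmem
      rcases List.mem_append.1 hmem with h1 | h1
      · exact hdis y (by simp [hy]) h1
      · simp only [List.mem_singleton] at h1
        subst h1
        exact (List.nodup_cons.1 hnd).1 hy

lemma ofList_nodup_eq {s : List Int} (h : s.Nodup) : PySem.Set.ofList s = s := by
  have := foldl_add_nodup s [] h (by simp)
  simpa [PySem.Set.ofList_eq_foldl] using this

lemma pvStreak_le_count (l : List Bool) : pvStreak l ≤ l.count true := by
  induction l with
  | nil => simp [pvStreak]
  | cons b tl ih =>
    cases b with
    | true =>
      show 1 + pvStreak tl ≤ (true :: tl).count true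
      rw [List.count_cons_self]
      omega
    | false =>
      have h0 : pvStreak (false :: tl) = 0 := rfl
      rw [h0]; exact Nat.zero_le _

lemma trueIdx_zero_mem (ms : List Bool) (j : Nat) :
    ((j : Int) ∈ trueIdx 0 ms) ↔ (j < ms.length ∧ ms.getD j false = true) := by
  rw [trueIdx_mem]
  constructor
  · rintro ⟨t, ht, hg, heq⟩
    have : t = j := by omega
    subst this; exact ⟨ht, hg⟩
  · rintro ⟨h1, h2⟩; exact ⟨j, h1, h2, by omega⟩

lemma drop_cons_getD (ms : List Bool) (j : Nat) (hj : j < ms.length) :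
    ms.drop j = ms.getD j false :: ms.drop (j + 1) := by
  rw [List.drop_eq_getElem_cons hj, List.getD_eq_getElem ms false hj]

lemma walk_eq (ms : List Bool) :
    ∀ (fuel : Nat) (j : Nat), pvStreak (ms.drop j) ≤ fuel →
      pvWalk (trueIdx 0 ms) fuel (j : Int)
        = (j : Int) + (pvStreak (ms.drop j) : Int) := by
  intro fuel
  induction fuel with
  | zero =>
    intro j h
    have h0 : pvStreak (ms.drop j) = 0 := by omega
    simp [pvWalk, h0]
  | succ fuel ih =>
    intro j h
    by_cases hm : (j : Int) ∈ trueIdx 0 ms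
    · obtain ⟨hj, hget⟩ := (trueIdx_zero_mem ms j).1 hm
      have hc : PySem.Set.contains (trueIdx 0 ms) (j : Int) = true :=
        (PySem.Set.contains_iff _ _).2 hm
      have hdrop : ms.drop j = true :: ms.drop (j + 1) := by
        rw [drop_cons_getD ms j hj, hget]
      have hstreak : pvStreak (ms.drop j) = 1 + pvStreak (ms.drop (j + 1)) := by
        rw [hdrop]; rfl
      have hle : pvStreak (ms.drop (j + 1)) ≤ fuel := by omega
      show (if PySem.Set.contains (trueIdx 0 ms) (j : Int) = true
            then pvWalk (trueIdx 0 ms) fuel ((j : Int) + 1) else (j : Int)) = _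
      rw [if_pos hc, show ((j : Int) + 1) = ((j + 1 : Nat) : Int) by push_cast; ring,
        ih (j + 1) hle, hstreak]
      push_cast; ring
    · have hc : ¬ PySem.Set.contains (trueIdx 0 ms) (j : Int) = true :=
        fun hx => hm ((PySem.Set.contains_iff _ _).1 hx)
      have h0 : pvStreak (ms.drop j) = 0 := by
        by_cases hj : j < ms.length
        · have hget : ms.getD j false = false := by
            cases hx : ms.getD j false with
            | true => exact absurd ((trueIdx_zero_mem ms j).2 ⟨hj, hx⟩) hm
            | false => rfl
          rw [drop_cons_getD ms j hj, hget]; rfl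
        · rw [List.drop_eq_nil_of_le (by omega)]; rfl
      show (if PySem.Set.contains (trueIdx 0 ms) (j : Int) = true
            then pvWalk (trueIdx 0 ms) fuel ((j : Int) + 1) else (j : Int)) = _
      rw [if_neg hc, h0]
      simp

lemma runsAux_shift :
    ∀ (l : List Bool) (c : Nat) (r : Int),
      (runsAux c l).foldl (fun (m : Int) (x : Nat) => max m (x : Int)) r
        = (runsAux 0 (l.dropWhile (· == true))).foldl (fun (m : Int) (x : Nat) => max m (x : Int))
            (max r ((c + pvStreak l : Nat) : Int)) := by
  intro l
  induction l with
  | nil =>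
    intro c r
    show max r (c : Int) = max (max r ((c + pvStreak [] : Nat) : Int)) ((0 : Nat) : Int)
    have h0 : pvStreak [] = 0 := rfl
    rw [h0]
    have : (0 : Int) ≤ max r (c : Int) := le_trans (Int.ofNat_nonneg c) (le_max_right _ _)
    simp [max_eq_left this]
  | cons b tl ih =>
    intro c r
    cases b with
    | true =>
      show (runsAux (c + 1) tl).foldl _ r = _
      rw [ih (c + 1) r]
      have hd : List.dropWhile (· == true) (true :: tl) = List.dropWhile (· == true) tl := by
        simp [List.dropWhile]
      have hs : pvStreak (true :: tl) = 1 + pvStreak tl := rfl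
      rw [hd, hs, show c + 1 + pvStreak tl = c + (1 + pvStreak tl) by omega]
    | false =>
      show (c :: runsAux 0 tl).foldl _ r = _
      have hd : List.dropWhile (· == true) (false :: tl) = false :: tl := by
        simp [List.dropWhile]
      have hs : pvStreak (false :: tl) = 0 := rfl
      rw [List.foldl_cons, hd, hs]
      show (runsAux 0 tl).foldl _ (max r (c : Int))
          = (0 :: runsAux 0 tl).foldl _ (max r ((c + 0 : Nat) : Int))
      rw [List.foldl_cons]
      have : (0 : Int) ≤ max r ((c + 0 : Nat) : Int) :=
        le_trans (Int.ofNat_nonneg _) (le_max_right _ _)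
      simp [max_eq_left this]

lemma maxRunAux_eq_runsAux :
    ∀ (l : List Bool) (c : Nat) (b : Int),
      maxRunAux (c : Int) b l = (runsAux c l).foldl (fun (m : Int) (x : Nat) => max m (x : Int)) b := by
  intro l
  induction l with
  | nil => intro c b; simp [maxRunAux, runsAux, max_comm]
  | cons x tl ih =>
    intro c b
    cases x with
    | true =>
      show maxRunAux ((c : Int) + 1) b tl = _
      rw [show ((c : Int) + 1) = ((c + 1 : Nat) : Int) by push_cast; ring, ih (c + 1) b]
      rfl
    | false =>
      show maxRunAux 0 (max (c : Int) b) tl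
          = (c :: runsAux 0 tl).foldl (fun (m : Int) (x : Nat) => max m (x : Int)) b
      rw [List.foldl_cons, ← Nat.cast_zero, ih 0 (max (c : Int) b), max_comm (c : Int) b]

lemma contains_false_of_not_mem {s : List Int} {q : Int} (h : q ∉ s) :
    ¬ PySem.Set.contains s q = true :=
  fun hx => h ((PySem.Set.contains_iff _ _).1 hx)

lemma streak_drop_le (ms : List Bool) (t : Nat) :
    pvStreak (ms.drop t) ≤ (trueIdx 0 ms).length := by
  rw [trueIdx_length]
  exact le_trans (pvStreak_le_count _) ((List.drop_sublist t ms).count_le true)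

lemma main_fold (ms : List Bool) :
    ∀ (n j : Nat) (r : Int), ms.length - j ≤ n → 0 ≤ r → j ≤ ms.length →
      ((j = 0 ∨ ms.getD (j - 1) false = false) →
        (trueIdx (j : Int) (ms.drop j)).foldl (stepB (trueIdx 0 ms)) r
          = (runsAux 0 (ms.drop j)).foldl (fun (m : Int) (x : Nat) => max m (x : Int)) r)
      ∧ (ms.getD (j - 1) false = true → 1 ≤ j →
        (trueIdx (j : Int) (ms.drop j)).foldl (stepB (trueIdx 0 ms)) r
          = (runsAux 0 ((ms.drop j).dropWhile (· == true))).foldl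
              (fun (m : Int) (x : Nat) => max m (x : Int)) r) := by
  intro n
  induction n with
  | zero =>
    intro j r hn hr hj
    have hje : j = ms.length := by omega
    subst hje
    rw [List.drop_length]
    constructor
    · intro _
      show r = (runsAux 0 []).foldl _ r
      show r = max r ((0 : Nat) : Int)
      simp [max_eq_left hr]
    · intro _ _
      show r = (runsAux 0 (List.dropWhile (· == true) [])).foldl _ r
      show r = max r ((0 : Nat) : Int)
      simp [max_eq_left hr]
  | succ n ih =>
    intro j r hn hr hj
    by_cases hjl : j < ms.length
    · have hdropc := drop_cons_getD ms j hjl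
      cases hms : ms.getD j false with
      | false =>
        -- position j does not match: skipped by both sides
        rw [hdropc, hms]
        have hstep : trueIdx (j : Int) (false :: ms.drop (j + 1))
            = trueIdx ((j + 1 : Nat) : Int) (ms.drop (j + 1)) := by
          show trueIdx ((j : Int) + 1) _ = _
          norm_num
        rw [hstep]
        have hih := (ih (j + 1) r (by omega) hr (by omega)).1
          (Or.inr (by simpa using hms))
        constructor
        · intro _
          rw [hih]
          show _ = (0 :: runsAux 0 (ms.drop (j + 1))).foldl _ r
          rw [List.foldl_cons]
          show _ = (runsAux 0 (ms.drop (j + 1))).foldl _ (max r ((0 : Nat) : Int))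
          simp [max_eq_left hr]
        · intro _ _
          rw [hih]
          have hd : List.dropWhile (· == true) (false :: ms.drop (j + 1))
              = false :: ms.drop (j + 1) := by simp [List.dropWhile]
          rw [hd]
          show _ = (0 :: runsAux 0 (ms.drop (j + 1))).foldl _ r
          rw [List.foldl_cons]
          show _ = (runsAux 0 (ms.drop (j + 1))).foldl _ (max r ((0 : Nat) : Int))
          simp [max_eq_left hr]
      | true =>
        rw [hdropc, hms]
        have hcons : trueIdx (j : Int) (true :: ms.drop (j + 1))
            = (j : Int) :: trueIdx ((j + 1 : Nat) : Int) (ms.drop (j + 1)) := by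
          show (j : Int) :: trueIdx ((j : Int) + 1) _ = _
          norm_num
        rw [hcons, List.foldl_cons]
        constructor
        · -- fresh: j starts a run
          intro hfr
          have hnc : ¬ PySem.Set.contains (trueIdx 0 ms) ((j : Int) - 1) = true := by
            apply contains_false_of_not_mem
            intro hmem
            rcases (trueIdx_mem ms 0 _).1 hmem with ⟨t, ht, hg, heq⟩
            rcases hfr with h0 | hprev
            · omega
            · have : t = j - 1 := by omega
              subst this
              rw [hprev] at hg
              exact absurd hg (by simp)
          have hwalk : pvWalk (trueIdx 0 ms) (trueIdx 0 ms).length ((j : Int) + 1)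
              = ((j + 1 : Nat) : Int) + (pvStreak (ms.drop (j + 1)) : Int) := by
            rw [show ((j : Int) + 1) = ((j + 1 : Nat) : Int) by push_cast; ring]
            exact walk_eq ms _ (j + 1) (streak_drop_le ms (j + 1))
          have hstepb : stepB (trueIdx 0 ms) r (j : Int)
              = max r (1 + (pvStreak (ms.drop (j + 1)) : Int)) := by
            rw [stepB, if_neg hnc, hwalk]
            congr 1
            push_cast; ring
          rw [hstepb]
          have hr' : (0 : Int) ≤ max r (1 + (pvStreak (ms.drop (j + 1)) : Int)) :=
            le_trans hr (le_max_left _ _)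
          have hih := (ih (j + 1) _ (by omega) hr' (by omega)).2
            (by simpa using hms) (by omega)
          rw [hih]
          show _ = (runsAux 1 (ms.drop (j + 1))).foldl _ r
          rw [runsAux_shift (ms.drop (j + 1)) 1 r]
          congr 1
        · -- continuing: predecessor of j matched, j is skipped
          intro hprev hj1
          have hc : PySem.Set.contains (trueIdx 0 ms) ((j : Int) - 1) = true := by
            apply (PySem.Set.contains_iff _ _).2
            rw [show ((j : Int) - 1) = ((j - 1 : Nat) : Int) by omega]
            exact (trueIdx_zero_mem ms (j - 1)).2 ⟨by omega, hprev⟩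
          have hstepb : stepB (trueIdx 0 ms) r (j : Int) = r := by
            rw [stepB, if_pos hc]
          rw [hstepb]
          have hih := (ih (j + 1) r (by omega) hr (by omega)).2
            (by simpa using hms) (by omega)
          rw [hih]
          have hd : List.dropWhile (· == true) (true :: ms.drop (j + 1))
              = List.dropWhile (· == true) (ms.drop (j + 1)) := by
            simp [List.dropWhile]
          rw [hd]
    · -- j = ms.length: same as the base case
      have hje : j = ms.length := by omega
      subst hje
      rw [List.drop_length]
      constructor
      · intro _
        show r = (runsAux 0 []).foldl _ r
        show r = max r ((0 : Nat) : Int)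
        simp [max_eq_left hr]
      · intro _ _
        show r = (runsAux 0 (List.dropWhile (· == true) [])).foldl _ r
        show r = max r ((0 : Nat) : Int)
        simp [max_eq_left hr]

-- per-pair: A's inner loop score-update equals B's set computation
lemma pair_eq (ans a b : List Int) (ha : ans.length ≤ a.length) (hb : ans.length ≤ b.length)
    (best : Int) :
    (let st := (PySem.List.pyRange 0 (ans.length : Int) 1).foldl
        (fun (st : Int × Int × Int) i =>
          if (PySem.List.pyGetD a i 0 == PySem.List.pyGetD b i 0) &&
             (PySem.List.pyGetD b i 0 != PySem.List.pyGetD ans i 0) then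
            (st.1 + 1, st.2.1, if st.2.2 == -1 then 1 else st.2.2 + 1)
          else
            (st.1, if st.2.2 > st.2.1 then st.2.2 else st.2.1, -1)) (0, 0, -1)
     let max_len := if st.2.2 > st.2.1 then st.2.2 else st.2.1
     let score := st.1 + max_len ^ 2
     if score > best then score else best)
    = (let marked : PySem.Set Int := PySem.Set.ofList (pvMarked 0 a b ans)
       let run := marked.foldl (fun run p =>
         if PySem.Set.contains marked (p - 1) then run
         else max run (pvWalk marked marked.length (p + 1) - p)) 0
       max best (PySem.Set.len marked + run * run)) := by
  have hlen : (pvZip3Match a b ans).length = ans.length := by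
    rw [pvZip3Match_length]; omega
  have hfold :
      (PySem.List.pyRange 0 (ans.length : Int) 1).foldl
        (fun (st : Int × Int × Int) i =>
          if (PySem.List.pyGetD a i 0 == PySem.List.pyGetD b i 0) &&
             (PySem.List.pyGetD b i 0 != PySem.List.pyGetD ans i 0) then
            (st.1 + 1, st.2.1, if st.2.2 == -1 then 1 else st.2.2 + 1)
          else
            (st.1, if st.2.2 > st.2.1 then st.2.2 else st.2.1, -1)) (0, 0, -1)
      = (pvZip3Match a b ans).foldl stepA (0, 0, -1) := by
    rw [PySem.List.pyRange_zero_nat, List.foldl_map, List.range_eq_range', ← hlen]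
    refine foldl_range'_eq _ stepA (pvZip3Match a b ans) 0 (0, 0, -1) ?_
    intro k hk acc
    have hk' : k < ans.length := by rwa [hlen] at hk
    rw [Nat.zero_add]
    simp only [PySem.List.pyGetD_natCast]
    rw [← List.getD_eq_getElem (pvZip3Match a b ans) false hk,
        pvZip3Match_getD k a b ans (by omega) (by omega) hk']
    rfl
  simp only [hfold]
  obtain ⟨h1, h2⟩ := stepA_fold (pvZip3Match a b ans) 0 0 (-1) le_rfl (Or.inl rfl)
  rw [if_pos rfl] at h2
  simp only [h1, h2]
  rw [int_if_gt_eq_max]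
  have hofl : PySem.Set.ofList (pvMarked 0 a b ans) = trueIdx 0 (pvZip3Match a b ans) := by
    rw [pvMarked_eq_trueIdx a b ans 0]
    exact ofList_nodup_eq (trueIdx_nodup (pvZip3Match a b ans) 0)
  show _ = max best
      (PySem.Set.len (PySem.Set.ofList (pvMarked 0 a b ans)) +
        (PySem.Set.ofList (pvMarked 0 a b ans)).foldl
          (stepB (PySem.Set.ofList (pvMarked 0 a b ans))) 0 *
        (PySem.Set.ofList (pvMarked 0 a b ans)).foldl
          (stepB (PySem.Set.ofList (pvMarked 0 a b ans))) 0)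
  rw [hofl]
  have hrun : (trueIdx 0 (pvZip3Match a b ans)).foldl
      (stepB (trueIdx 0 (pvZip3Match a b ans))) 0
      = maxRunAux 0 0 (pvZip3Match a b ans) := by
    have hm := (main_fold (pvZip3Match a b ans) (pvZip3Match a b ans).length 0 0
      (by omega) le_rfl (Nat.zero_le _)).1 (Or.inl rfl)
    rw [List.drop_zero, Nat.cast_zero] at hm
    rw [hm, ← maxRunAux_eq_runsAux (pvZip3Match a b ans) 0 0, Nat.cast_zero]
  rw [hrun]
  have hslen : PySem.Set.len (trueIdx 0 (pvZip3Match a b ans))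
      = ((pvZip3Match a b ans).count true : Int) := by
    show ((trueIdx 0 (pvZip3Match a b ans)).length : Int) = _
    rw [trueIdx_length]
  rw [hslen]
  congr 1
  ring

lemma comb2_foldl (G : Int → Int → Int → Int) :
    ∀ (l : List Int) (r : Int),
      (PySem.List.combinations l 2).foldl
          (fun acc c => G acc (PySem.List.pyGetD c 0 0) (PySem.List.pyGetD c 1 0)) r
        = tailsFold G l r := by
  intro l
  induction l with
  | nil =>
    intro r
    rw [show (2 : Nat) = 1 + 1 from rfl, PySem.List.combinations_nil_succ]
    rfl
  | cons x t ih =>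
    intro r
    rw [show (2 : Nat) = 1 + 1 from rfl, PySem.List.combinations_cons_succ,
      PySem.List.combinations_one, List.map_map, List.foldl_append, List.foldl_map]
    show (PySem.List.combinations t 2).foldl _ _ = tailsFold G t (t.foldl (fun acc y => G acc x y) r)
    rw [ih]
    rfl

lemma range_nested (G : Int → Int → Int → Int) (n : Int) :
    ∀ (k : Nat) (a : Int) (r : Int), (n - a).toNat ≤ k →
      (PySem.List.pyRange a n 1).foldl (fun best i =>
          (PySem.List.pyRange (i + 1) n 1).foldl (fun best j => G best i j) best) r
        = tailsFold G (PySem.List.pyRange a n 1) r := by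
  intro k
  induction k with
  | zero =>
    intro a r h
    rw [PySem.List.pyRange_one_eq_nil (by omega)]
    rfl
  | succ k ih =>
    intro a r h
    by_cases hna : n ≤ a
    · rw [PySem.List.pyRange_one_eq_nil hna]
      rfl
    · rw [PySem.List.pyRange_one_cons (by omega), List.foldl_cons]
      show _ = tailsFold G (PySem.List.pyRange (a + 1) n 1)
        ((PySem.List.pyRange (a + 1) n 1).foldl (fun acc y => G acc a y) r)
      exact ih (a + 1) _ (by omega)

lemma tailsFold_congr (G1 G2 : Int → Int → Int → Int) :
    ∀ (l : List Int) (r : Int),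
      (∀ acc x y, x ∈ l → y ∈ l → G1 acc x y = G2 acc x y) →
      tailsFold G1 l r = tailsFold G2 l r := by
  intro l
  induction l with
  | nil => intro r _; rfl
  | cons x t ih =>
    intro r h
    show tailsFold G1 t (t.foldl (fun acc y => G1 acc x y) r)
        = tailsFold G2 t (t.foldl (fun acc y => G2 acc x y) r)
    have hf : t.foldl (fun acc y => G1 acc x y) r = t.foldl (fun acc y => G2 acc x y) r := by
      refine PySem.List.foldl_congr_mem _ _ _ _ ?_
      intro acc y hy
      exact h acc x y (by simp) (by simp [hy])
    rw [hf]
    exact ih _ (fun acc u v hu hv => h acc u v (by simp [hu]) (by simp [hv]))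

lemma tailsFold_short (G : Int → Int → Int → Int) :
    ∀ (l : List Int) (r : Int), l.length ≤ 1 → tailsFold G l r = r := by
  intro l r h
  match l with
  | [] => rfl
  | [x] => rfl
  | x :: y :: t => simp at h

-- the two per-pair bodies, named for the outer-loop reduction
def pairBodyA (ans : List Int) (sheets : List (List Int)) (acc s1 s2 : Int) : Int :=
  let st := (PySem.List.pyRange 0 (ans.length : Int) 1).foldl
    (fun (st : Int × Int × Int) i =>
      if (PySem.List.pyGetD (PySem.List.pyGetD sheets s1 []) i 0 ==
            PySem.List.pyGetD (PySem.List.pyGetD sheets s2 []) i 0) &&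
         (PySem.List.pyGetD (PySem.List.pyGetD sheets s2 []) i 0 !=
            PySem.List.pyGetD ans i 0) then
        (st.1 + 1, st.2.1, if st.2.2 == -1 then 1 else st.2.2 + 1)
      else
        (st.1, if st.2.2 > st.2.1 then st.2.2 else st.2.1, -1)) (0, 0, -1)
  let max_len := if st.2.2 > st.2.1 then st.2.2 else st.2.1
  let score := st.1 + max_len ^ 2
  if score > acc then score else acc

def pairBodyB (ans : List Int) (sheets : List (List Int)) (acc i j : Int) : Int :=
  let marked : PySem.Set Int :=
    PySem.Set.ofList (pvMarked 0 (PySem.List.pyGetD sheets i [])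
      (PySem.List.pyGetD sheets j []) ans)
  let run := marked.foldl (fun run p =>
    if PySem.Set.contains marked (p - 1) then run
    else max run (pvWalk marked marked.length (p + 1) - p)) 0
  max acc (PySem.Set.len marked + run * run)

-- ===== VERDICT (by name: the statement is the Claim_ definition above) =====
theorem solution_spec : Claim_equal_solution := by
  intro ans sheets _ hpre
  unfold Spec_solution
  show solution ans sheets = solution_alt ans sheets
  have hA : solution ans sheets
      = tailsFold (pairBodyA ans sheets) (PySem.List.pyRange 0 (sheets.length : Int) 1) 0 :=
    comb2_foldl (pairBodyA ans sheets) _ 0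
  have hB : solution_alt ans sheets
      = tailsFold (pairBodyB ans sheets) (PySem.List.pyRange 0 (sheets.length : Int) 1) 0 :=
    range_nested (pairBodyB ans sheets) _ sheets.length 0 0 (by omega)
  rw [hA, hB]
  by_cases hn2 : sheets.length < 2
  · have hlen : (PySem.List.pyRange 0 (sheets.length : Int) 1).length ≤ 1 := by
      rw [PySem.List.length_pyRange_one]; omega
    rw [tailsFold_short _ _ _ hlen, tailsFold_short _ _ _ hlen]
  · have hall : ∀ s ∈ sheets, ans.length ≤ s.length := hpre.resolve_left hn2
    refine tailsFold_congr _ _ _ 0 ?_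
    intro acc i j hi hj
    have hi' := PySem.List.mem_pyRange_one.1 hi
    have hj' := PySem.List.mem_pyRange_one.1 hj
    have hiN : i.toNat < sheets.length := by omega
    have hjN : j.toNat < sheets.length := by omega
    have ei : i = ((i.toNat : Nat) : Int) := by omega
    have ej : j = ((j.toNat : Nat) : Int) := by omega
    unfold pairBodyA pairBodyB
    rw [ei, ej]
    simp only [PySem.List.pyGetD_natCast, List.getD_eq_getElem sheets ([] : List Int) hiN,
      List.getD_eq_getElem sheets ([] : List Int) hjN]
    exact pair_eq ans sheets[i.toNat] sheets[j.toNat]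
      (hall _ (List.getElem_mem hiN)) (hall _ (List.getElem_mem hjN)) acc
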